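-- pv_equiv track=rewrite | github.com/HyeJiRoh/Algorithm | 프로그래머스/lv0/120837. 개미 군단/개미 군단.py | solution
-- ===== SOURCE A (Python) =====
-- def solution(hp):
--     answer = 0
--     while(hp!=0) :
--         if hp >= 5:
--             answer += hp//5
--             hp = hp%5
--         elif hp<5 and hp >= 3 :
--             answer += hp//3
--             hp = hp%3
--         elif hp < 3 :
--             answer += 1
--             hp -= 1
--     return answer
-- ===== SOURCE B (Python) =====
-- def solution(hp):
--     # closed-form greedy: 5s, then 3s from the remainder, then 1s
--     return hp // 5 + (hp % 5) // 3 + (hp % 5) % 3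
-- ===== Notes on version B (the rewrite author's own statement) =====
-- stated objective: simpler
-- what changed: Replaces A's while-loop of repeated greedy subtraction with a single closed-form arithmetic expression of floor-divisions and remainders (soldiers first, then workers from the remainder, then privates).
import Mathlib
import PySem

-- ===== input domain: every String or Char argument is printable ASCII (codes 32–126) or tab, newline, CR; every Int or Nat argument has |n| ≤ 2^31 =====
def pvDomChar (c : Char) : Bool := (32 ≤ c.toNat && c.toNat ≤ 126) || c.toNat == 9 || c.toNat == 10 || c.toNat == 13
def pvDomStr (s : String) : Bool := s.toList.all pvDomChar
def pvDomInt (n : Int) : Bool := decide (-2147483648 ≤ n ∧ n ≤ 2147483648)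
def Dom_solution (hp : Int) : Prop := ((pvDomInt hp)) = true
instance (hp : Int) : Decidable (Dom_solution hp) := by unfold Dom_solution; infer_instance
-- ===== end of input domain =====

-- B replaces A's greedy while-loop with one closed-form arithmetic expression (objective: simpler).

-- ===== PORT A =====
-- A's while-loop; the 'hp < 0' guard only makes the recursion total in Lean:
-- there Python A loops forever (excluded by Pre_solution).
def solutionLoop (hp answer : Int) : Int :=
  if hp = 0 then answer
  else if hp < 0 then answer
  else if 5 ≤ hp then solutionLoop (PySem.Int.mod hp 5) (answer + PySem.Int.floordiv hp 5)
  else if hp < 5 ∧ 3 ≤ hp then solutionLoop (PySem.Int.mod hp 3) (answer + PySem.Int.floordiv hp 3)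
  else if hp < 3 then solutionLoop (hp - 1) (answer + 1)
  else answer
termination_by hp.toNat
decreasing_by
  · have h5 : PySem.Int.mod hp 5 = hp % 5 := PySem.Int.mod_eq_emod_of_pos (by omega)
    omega
  · have h3 : PySem.Int.mod hp 3 = hp % 3 := PySem.Int.mod_eq_emod_of_pos (by omega)
    omega
  · omega

def solution (hp : Int) : Int := solutionLoop hp 0

-- ===== PORT B =====
def solution_alt (hp : Int) : Int :=
  PySem.Int.floordiv hp 5 + PySem.Int.floordiv (PySem.Int.mod hp 5) 3
    + PySem.Int.mod (PySem.Int.mod hp 5) 3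

-- ===== PRECONDITION & SPEC =====
-- Pre_ excludes negative hp, on which Python A's while-loop never terminates (no value is returned).
def Pre_solution (hp : Int) : Prop := 0 ≤ hp
instance (hp : Int) : Decidable (Pre_solution hp) := by unfold Pre_solution; infer_instance
def pvWitness_solution : Int := 23

def Spec_solution (hp : Int) (out : Int) : Prop := out = solution_alt hp
instance (hp : Int) (out : Int) : Decidable (Spec_solution hp out) := by unfold Spec_solution; infer_instance

-- ===== CLAIM (what is proved, stated in full; the proofs are below) =====
def Claim_equal_solution : Prop := ∀ (hp : Int), Dom_solution hp → Pre_solution hp → Spec_solution hp (solution hp)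

-- ===== LEMMAS AND PROOFS =====

-- For 0 ≤ r < 3 the loop peels off 1 at a time.
theorem solutionLoop_small (r : Int) (h0 : 0 ≤ r) (h3 : r < 3) (ans : Int) :
    solutionLoop r ans = ans + r := by
  have : r = 0 ∨ r = 1 ∨ r = 2 := by omega
  rcases this with h | h | h <;> subst h <;>
    simp [solutionLoop] <;> ring

-- For 3 ≤ r < 5 the loop takes r // 3 workers, then privates.
theorem solutionLoop_mid (r : Int) (h3 : 3 ≤ r) (h5 : r < 5) (ans : Int) :
    solutionLoop r ans = ans + r / 3 + r % 3 := by
  have : r = 3 ∨ r = 4 := by omega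
  rcases this with h | h <;> subst h <;>
    simp [solutionLoop]

theorem solutionLoop_closed (hp : Int) (h0 : 0 ≤ hp) (ans : Int) :
    solutionLoop hp ans = ans + hp / 5 + (hp % 5) / 3 + (hp % 5) % 3 := by
  by_cases h5 : 5 ≤ hp
  · rw [solutionLoop]
    have hne : ¬ hp = 0 := by omega
    have hnneg : ¬ hp < 0 := by omega
    rw [if_neg hne, if_neg hnneg, if_pos h5]
    have hm : PySem.Int.mod hp 5 = hp % 5 := PySem.Int.mod_eq_emod_of_pos (by omega)
    have hd : PySem.Int.floordiv hp 5 = hp / 5 := PySem.Int.floordiv_eq_ediv_of_pos (by omega)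
    rw [hm, hd]
    have hr0 : 0 ≤ hp % 5 := Int.emod_nonneg _ (by omega)
    have hr5 : hp % 5 < 5 := Int.emod_lt_of_pos _ (by omega)
    by_cases h3 : 3 ≤ hp % 5
    · rw [solutionLoop_mid _ h3 hr5]
    · rw [solutionLoop_small _ hr0 (by omega)]
      omega
  · have hself5 : hp % 5 = hp := Int.emod_eq_of_lt h0 (by omega)
    have hdiv5 : hp / 5 = 0 := Int.ediv_eq_zero_of_lt h0 (by omega)
    rw [hself5, hdiv5]
    by_cases h3 : 3 ≤ hp
    · rw [solutionLoop_mid _ h3 (by omega)]; ring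
    · rw [solutionLoop_small _ h0 (by omega)]
      omega

-- ===== VERDICT (by name: the statement is the Claim_ definition above) =====
theorem solution_spec : Claim_equal_solution := by
  intro hp _ hpre
  unfold Spec_solution solution solution_alt
  have hm5 : PySem.Int.mod hp 5 = hp % 5 := PySem.Int.mod_eq_emod_of_pos (by omega)
  have hd5 : PySem.Int.floordiv hp 5 = hp / 5 := PySem.Int.floordiv_eq_ediv_of_pos (by omega)
  have hr0 : 0 ≤ hp % 5 := Int.emod_nonneg _ (by omega)
  have hm3 : PySem.Int.mod (hp % 5) 3 = (hp % 5) % 3 := PySem.Int.mod_eq_emod_of_pos (by omega)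
  have hd3 : PySem.Int.floordiv (hp % 5) 3 = (hp % 5) / 3 := PySem.Int.floordiv_eq_ediv_of_pos (by omega)
  rw [hm5, hd5, hm3, hd3, solutionLoop_closed hp hpre 0]
  ring
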